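-- pv_equiv track=rewrite | github.com/soubsn/recho_ai | recho_pipeline/data/sample_data.py | _select_esc50_rows
-- ===== SOURCE A (Python) =====
-- def _select_esc50_rows(
--     rows: list[dict[str, str]],
--     esc10: bool,
--     max_clips_per_class: int | None,
-- ) -> tuple[list[dict[str, str]], list[str]]:
--     """
--     Filter rows for esc10 (curated 10-class subset) if requested,
--     cap clips per class, and return (filtered_rows, class_names).
--     Class IDs in the returned rows are remapped to a contiguous 0..N-1.
--     """
--     if esc10:
--         rows = [r for r in rows if r["esc10"].strip().lower() == "true"]
--
--     # Build sorted unique categories so label IDs are stable across runs.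
--     categories = sorted({r["category"] for r in rows})
--     cat_to_id = {c: i for i, c in enumerate(categories)}
--
--     # Cap per class.
--     by_cls: dict[int, list[dict[str, str]]] = {}
--     for r in rows:
--         cid = cat_to_id[r["category"]]
--         r = dict(r)
--         r["_class_id"] = str(cid)
--         by_cls.setdefault(cid, []).append(r)
--
--     selected: list[dict[str, str]] = []
--     for cid in sorted(by_cls):
--         clips = by_cls[cid]
--         if max_clips_per_class is not None:
--             clips = clips[:max_clips_per_class]
--         selected.extend(clips)
--
--     return selected, categories
-- ===== SOURCE B (Python) =====
-- def _select_esc50_rows(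
--     rows: list[dict[str, str]],
--     esc10: bool,
--     max_clips_per_class: int | None,
-- ) -> tuple[list[dict[str, str]], list[str]]:
--     """Same filtering/cap/remap, but one filtering pass per category in
--     label order instead of a grouping dict plus a key sort."""
--     if esc10:
--         rows = [r for r in rows if r["esc10"].strip().lower() == "true"]
--
--     categories = sorted({r["category"] for r in rows})
--
--     selected: list[dict[str, str]] = []
--     for cid, cat in enumerate(categories):
--         group = [dict(r, _class_id=str(cid)) for r in rows if r["category"] == cat]
--         if max_clips_per_class is not None:
--             group = group[:max_clips_per_class]
--         selected.extend(group)
--     return selected, categories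
-- ===== Notes on version B (the rewrite author's own statement) =====
-- stated objective: simpler
-- what changed: A builds a dict grouping rows by class id and then iterates its sorted keys; B drops the cat_to_id and by_cls dicts entirely and instead makes one filtering pass over the rows per category, in the already-sorted category order, capping each group as it goes.
import Mathlib
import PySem

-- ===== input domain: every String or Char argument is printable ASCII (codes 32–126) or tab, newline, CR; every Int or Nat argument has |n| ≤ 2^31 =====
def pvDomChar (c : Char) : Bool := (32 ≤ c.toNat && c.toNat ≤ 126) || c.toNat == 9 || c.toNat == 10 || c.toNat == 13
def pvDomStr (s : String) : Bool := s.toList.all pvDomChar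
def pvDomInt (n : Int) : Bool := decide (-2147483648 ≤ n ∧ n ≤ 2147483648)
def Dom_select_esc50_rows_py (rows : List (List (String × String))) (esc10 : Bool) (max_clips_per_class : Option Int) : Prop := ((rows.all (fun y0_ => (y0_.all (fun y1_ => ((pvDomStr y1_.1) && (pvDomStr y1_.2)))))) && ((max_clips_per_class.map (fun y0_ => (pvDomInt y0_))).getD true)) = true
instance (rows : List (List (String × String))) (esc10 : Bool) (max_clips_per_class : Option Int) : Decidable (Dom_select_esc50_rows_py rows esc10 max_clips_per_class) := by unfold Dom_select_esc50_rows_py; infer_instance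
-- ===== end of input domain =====

-- B replaces A's grouping dict + key sort by one filtering pass per category in label order (objective: simpler; return values proved equal on Pre_).

-- shared helpers (lines both Pythons share verbatim: dict lookup, the esc10 test, the row copy with _class_id, the cap)
def pvRowGet (r : List (String × String)) (k : String) : String :=
  PySem.Dict.getD (PySem.Dict.mk r) k ""          -- r[k] with "" default; Pre_ guarantees presence where Python subscripts
def pvPass (r : List (String × String)) : Bool :=
  PySem.Str.lower (PySem.Str.strip (pvRowGet r "esc10")) == "true"
def pvCat (r : List (String × String)) : String := pvRowGet r "category"
def pvWithId (r : List (String × String)) (cid : Int) : List (String × String) :=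
  (PySem.Dict.insert (PySem.Dict.mk r) "_class_id" (PySem.Int.toStr cid)).items
def pvCap (mx : Option Int) (xs : List (List (String × String))) : List (List (String × String)) :=
  match mx with
  | some m => PySem.List.slice xs none (some m)   -- clips[:m]
  | none   => xs

-- ===== PORT A =====
def select_esc50_rows_py (rows : List (List (String × String))) (esc10 : Bool) (max_clips_per_class : Option Int) : (List (List (String × String))) × List String :=
  let rows2 := if esc10 then rows.filter pvPass else rows
  let categories := PySem.List.sorted (PySem.Set.ofList (rows2.map pvCat)) (fun c => c) false
  let cat_to_id : PySem.Dict String Int :=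
    (PySem.List.enumerate categories).foldl (fun d ic => d.insert ic.2 ic.1) PySem.Dict.empty
  let by_cls : PySem.Dict Int (List (List (String × String))) :=
    rows2.foldl (fun d r =>
      let cid := cat_to_id.getD (pvCat r) 0
      d.modify cid [] (fun l => l ++ [pvWithId r cid])) PySem.Dict.empty
  let selected := (PySem.List.sorted by_cls.keys (fun k => k) false).foldl
      (fun acc cid => acc ++ pvCap max_clips_per_class (by_cls.getD cid [])) []
  (selected, categories)

-- ===== PORT B =====
def select_esc50_rows_py_alt (rows : List (List (String × String))) (esc10 : Bool) (max_clips_per_class : Option Int) : (List (List (String × String))) × List String :=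
  let rows2 := if esc10 then rows.filter pvPass else rows
  let categories := PySem.List.sorted (PySem.Set.ofList (rows2.map pvCat)) (fun c => c) false
  let selected := (PySem.List.enumerate categories).foldl
      (fun acc ic =>
        acc ++ pvCap max_clips_per_class
          ((rows2.filter (fun r => pvCat r == ic.2)).map (fun r => pvWithId r ic.1))) []
  (selected, categories)

-- ===== PRECONDITION & SPEC =====
-- Pre_ excludes rows whose association list has duplicate keys (a Python dict cannot contain them, so they do not
-- represent any Python input) and rows missing the "esc10" key (when esc10 is set) or the "category" key (when the
-- row survives the esc10 filter), on which the Python raises KeyError.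
def Pre_select_esc50_rows_py (rows : List (List (String × String))) (esc10 : Bool) (max_clips_per_class : Option Int) : Prop :=
  ∀ r ∈ rows, (r.map Prod.fst).Nodup ∧
    (esc10 = true → (PySem.Dict.mk r).contains "esc10" = true) ∧
    ((esc10 = true → pvPass r = true) → (PySem.Dict.mk r).contains "category" = true)
instance (rows : List (List (String × String))) (esc10 : Bool) (max_clips_per_class : Option Int) : Decidable (Pre_select_esc50_rows_py rows esc10 max_clips_per_class) := by unfold Pre_select_esc50_rows_py; infer_instance

def pvWitness_select_esc50_rows_py : (List (List (String × String))) × Bool × Option Int :=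
  ([[("category", "dog"), ("esc10", "True")], [("category", "rain"), ("esc10", "false")]], true, some 1)

def Spec_select_esc50_rows_py (rows : List (List (String × String))) (esc10 : Bool) (max_clips_per_class : Option Int) (out : (List (List (String × String))) × List String) : Prop := out = select_esc50_rows_py_alt rows esc10 max_clips_per_class
instance (rows : List (List (String × String))) (esc10 : Bool) (max_clips_per_class : Option Int) (out : (List (List (String × String))) × List String) : Decidable (Spec_select_esc50_rows_py rows esc10 max_clips_per_class out) := by unfold Spec_select_esc50_rows_py; infer_instance

-- ===== CLAIM (what is proved, stated in full; the proofs are below) =====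
def Claim_equal_select_esc50_rows_py : Prop := ∀ (rows : List (List (String × String))) (esc10 : Bool) (max_clips_per_class : Option Int), Dom_select_esc50_rows_py rows esc10 max_clips_per_class → Pre_select_esc50_rows_py rows esc10 max_clips_per_class → Spec_select_esc50_rows_py rows esc10 max_clips_per_class (select_esc50_rows_py rows esc10 max_clips_per_class)

-- ===== LEMMAS AND PROOFS =====

-- A's cat_to_id dict, named for the proofs (definitionally the fold in port A)
def pvCatToId (cats : List String) : PySem.Dict String Int :=
  (PySem.List.enumerate cats).foldl (fun d ic => d.insert ic.2 ic.1) PySem.Dict.empty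

lemma pvCatToId_items (cats : List String) (hnd : cats.Nodup) :
    (pvCatToId cats).items = (PySem.List.enumerate cats).map (fun ic => (ic.2, ic.1)) := by
  have h := PySem.Dict.items_foldl_insert_fresh (PySem.List.enumerate cats)
      (fun ic => ic.2) (fun ic => ic.1) (PySem.Dict.empty)
      (fun a _ => PySem.Dict.contains_empty _)
      (by rw [PySem.List.map_snd_enumerate]; exact hnd)
  simpa [pvCatToId] using h

lemma pvCatToId_keys (cats : List String) (hnd : cats.Nodup) :
    (pvCatToId cats).keys = cats := by
  have h : (pvCatToId cats).keys = (pvCatToId cats).items.map Prod.fst := rfl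
  rw [h, pvCatToId_items cats hnd, List.map_map]
  exact PySem.List.map_snd_enumerate cats 0

lemma pvCatToId_getD (cats : List String) (hnd : cats.Nodup) (i : Nat) (hi : i < cats.length) :
    (pvCatToId cats).getD cats[i] 0 = (i : Int) := by
  have hlen : i < (PySem.List.enumerate cats 0).length := by
    simpa [PySem.List.length_enumerate] using hi
  have hmem : ((i : Int), cats[i]) ∈ PySem.List.enumerate cats := by
    have hg := PySem.List.getElem_enumerate cats 0 i hlen
    simp only [zero_add] at hg
    rw [← hg]; exact List.getElem_mem hlen
  have hitem : (cats[i], (i : Int)) ∈ (pvCatToId cats).items := by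
    rw [pvCatToId_items cats hnd]
    exact List.mem_map.mpr ⟨((i : Int), cats[i]), hmem, rfl⟩
  exact PySem.Dict.getD_of_mem_items _ hitem (by rw [pvCatToId_keys cats hnd]; exact hnd) 0

lemma pv_cid_eq_iff (cats : List String) (hnd : cats.Nodup) (r : List (String × String))
    (hr : pvCat r ∈ cats) (i : Nat) (hi : i < cats.length) :
    (pvCatToId cats).getD (pvCat r) 0 = (i : Int) ↔ pvCat r = cats[i] := by
  obtain ⟨j, hj, hje⟩ := List.mem_iff_getElem.mp hr
  constructor
  · intro h
    rw [← hje] at h ⊢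
    rw [pvCatToId_getD cats hnd j hj] at h
    have : j = i := by exact_mod_cast h
    subst this; rfl
  · intro h
    rw [h]; exact pvCatToId_getD cats hnd i hi

lemma pv_sel_eq (rows2 : List (List (String × String))) (mx : Option Int) :
    (let categories := PySem.List.sorted (PySem.Set.ofList (rows2.map pvCat)) (fun c => c) false
     let cat_to_id : PySem.Dict String Int :=
       (PySem.List.enumerate categories).foldl (fun d ic => d.insert ic.2 ic.1) PySem.Dict.empty
     let by_cls : PySem.Dict Int (List (List (String × String))) :=
       rows2.foldl (fun d r =>
         let cid := cat_to_id.getD (pvCat r) 0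
         d.modify cid [] (fun l => l ++ [pvWithId r cid])) PySem.Dict.empty
     (PySem.List.sorted by_cls.keys (fun k => k) false).foldl
       (fun acc cid => acc ++ pvCap mx (by_cls.getD cid [])) [])
    = (PySem.List.enumerate (PySem.List.sorted (PySem.Set.ofList (rows2.map pvCat)) (fun c => c) false)).foldl
        (fun acc ic =>
          acc ++ pvCap mx
            ((rows2.filter (fun r => pvCat r == ic.2)).map (fun r => pvWithId r ic.1))) [] := by
  set cats := PySem.List.sorted (PySem.Set.ofList (rows2.map pvCat)) (fun c => c) false with hcats
  have hperm := PySem.List.sorted_perm (PySem.Set.ofList (rows2.map pvCat)) (fun c => c) false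
  have hnd : cats.Nodup := hperm.symm.nodup (PySem.Set.nodup_ofList _)
  have hmem : ∀ s, s ∈ cats ↔ s ∈ rows2.map pvCat := fun s =>
    (hperm.mem_iff).trans (PySem.Set.mem_ofList _ s)
  set cid : List (String × String) → Int := fun r => (pvCatToId cats).getD (pvCat r) 0 with hcid
  show (PySem.List.sorted
          (rows2.foldl (fun d r =>
            d.modify (cid r) [] (fun l => l ++ [pvWithId r (cid r)])) PySem.Dict.empty).keys
          (fun k => k) false).foldl
        (fun acc c => acc ++ pvCap mx
          ((rows2.foldl (fun d r =>
            d.modify (cid r) [] (fun l => l ++ [pvWithId r (cid r)])) PySem.Dict.empty).getD c [])) []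
      = (PySem.List.enumerate cats).foldl
        (fun acc ic => acc ++ pvCap mx
          ((rows2.filter (fun r => pvCat r == ic.2)).map (fun r => pvWithId r ic.1))) []
  set by_cls := rows2.foldl (fun d r =>
      d.modify (cid r) [] (fun l => l ++ [pvWithId r (cid r)])) PySem.Dict.empty with hby
  -- value of by_cls at each key
  have hgetD : ∀ c : Int, by_cls.getD c []
      = (rows2.filter (fun r => cid r == c)).map (fun r => pvWithId r (cid r)) := by
    intro c
    have hfold : by_cls = (rows2.map (fun r => (cid r, pvWithId r (cid r)))).foldl
        (fun d p => d.modify p.1 [] (fun l => l ++ [p.2])) PySem.Dict.empty :=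
      (List.foldl_map (f := fun r => (cid r, pvWithId r (cid r)))
        (g := fun d p => d.modify p.1 [] (fun l => l ++ [p.2]))
        (l := rows2) (init := PySem.Dict.empty)).symm
    rw [hfold, PySem.Dict.getD_foldl_modify_append, PySem.Dict.getD_empty, List.filter_map,
        List.map_map]
    rfl
  -- keys of by_cls
  have hkeys : by_cls.keys = PySem.Set.ofList (rows2.map cid) := by
    have h := PySem.Dict.keys_foldl_modify_key rows2 cid ([] : List (List (String × String)))
        (fun _ r => fun l => l ++ [pvWithId r (cid r)]) PySem.Dict.empty
    rw [hby]
    exact h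
  -- every row's cid is an index of cats, and every index occurs
  have hN : ∀ x : Int, x ∈ rows2.map cid ↔ 0 ≤ x ∧ x < (cats.length : Int) := by
    intro x
    constructor
    · rintro hx
      obtain ⟨r, hr, hrx⟩ := List.mem_map.mp hx
      have hc : pvCat r ∈ cats := (hmem _).mpr (List.mem_map_of_mem hr)
      obtain ⟨j, hj, hje⟩ := List.mem_iff_getElem.mp hc
      have : cid r = (j : Int) := by
        show (pvCatToId cats).getD (pvCat r) 0 = (j : Int)
        rw [← hje]; exact pvCatToId_getD cats hnd j hj
      rw [← hrx, this]
      constructor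
      · exact_mod_cast Nat.zero_le j
      · exact_mod_cast hj
    · rintro ⟨h0, h1⟩
      have hi : x.toNat < cats.length := by omega
      have hc : cats[x.toNat] ∈ cats := List.getElem_mem hi
      obtain ⟨r, hr, hre⟩ := List.mem_map.mp ((hmem _).mp hc)
      refine List.mem_map.mpr ⟨r, hr, ?_⟩
      have : cid r = (x.toNat : Int) := by
        show (pvCatToId cats).getD (pvCat r) 0 = (x.toNat : Int)
        rw [hre]; exact pvCatToId_getD cats hnd x.toNat hi
      rw [this]; omega
  -- sorted keys = 0..N-1
  have hsorted : PySem.List.sorted by_cls.keys (fun k => k) false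
      = PySem.List.pyRange 0 (cats.length : Int) := by
    refine PySem.List.sorted_eq_of_perm_of_pairwise_lt _ _ _ ?_ ?_
    · refine (List.perm_ext_iff_of_nodup ?_ ?_).mpr ?_
      · rw [PySem.List.pyRange_zero_natCast]
        exact (List.nodup_range).map (fun a b => by exact_mod_cast id)
      · rw [hkeys]; exact PySem.Set.nodup_ofList _
      · intro a
        rw [hkeys, PySem.Set.mem_ofList, hN, PySem.List.mem_pyRange_one]
    · rw [PySem.List.pyRange_zero_natCast]
      exact List.pairwise_lt_range.map _ (fun a b h => by
        show (a : Int) < (b : Int); exact_mod_cast h)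
  rw [hsorted, PySem.List.enumerate_eq_map_pyRange cats "", List.foldl_map]
  have hlen : PySem.List.len cats = (cats.length : Int) := rfl
  rw [hlen]
  refine PySem.List.foldl_congr_mem _ _ _ _ ?_
  intro acc c hc
  obtain ⟨h0, h1⟩ := PySem.List.mem_pyRange_one.mp hc
  have hi : c.toNat < cats.length := by omega
  have hcnat : ((c.toNat : Nat) : Int) = c := by omega
  have hgetc : PySem.List.pyGetD cats c "" = cats[c.toNat] :=
    PySem.List.pyGetD_eq_getElem cats "" h0 (by exact_mod_cast h1)
  show acc ++ pvCap mx (by_cls.getD c [])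
      = acc ++ pvCap mx ((rows2.filter (fun r => pvCat r == PySem.List.pyGetD cats c "")).map
          (fun r => pvWithId r c))
  congr 1
  rw [hgetD c, hgetc]
  have hfc : rows2.filter (fun r => cid r == c)
      = rows2.filter (fun r => pvCat r == cats[c.toNat]) := by
    refine List.filter_congr ?_
    intro r hr
    have hcr : pvCat r ∈ cats := (hmem _).mpr (List.mem_map_of_mem hr)
    have := pv_cid_eq_iff cats hnd r hcr c.toNat hi
    rw [hcnat] at this
    rw [Bool.eq_iff_iff]
    simp only [beq_iff_eq]
    show (pvCatToId cats).getD (pvCat r) 0 = c ↔ pvCat r = cats[c.toNat]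
    exact this
  rw [hfc]
  refine congrArg (pvCap mx) (List.map_congr_left ?_)
  intro r hr
  obtain ⟨hrmem, hrq⟩ := List.mem_filter.mp hr
  have hq : pvCat r = cats[c.toNat] := by simpa using hrq
  have hce : cid r = c := by
    show (pvCatToId cats).getD (pvCat r) 0 = c
    rw [hq, pvCatToId_getD cats hnd c.toNat hi, hcnat]
  rw [hce]

-- ===== VERDICT (by name: the statement is the Claim_ definition above) =====
theorem select_esc50_rows_py_spec : Claim_equal_select_esc50_rows_py := by
  intro rows esc10 mx _hdom _hpre
  unfold Spec_select_esc50_rows_py select_esc50_rows_py select_esc50_rows_py_alt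
  refine Prod.ext ?_ rfl
  exact pv_sel_eq (if esc10 then rows.filter pvPass else rows) mx
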